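-- pv_equiv track=rewrite | github.com/joaoemanuelzilli/CodeSprint | Competitive_Programming/4_escadinha.py | count
-- ===== SOURCE A (Python) =====
-- def count(sequence):
--     num = len(sequence)
--     if num <= 2:
--         return 1
--
--     count = 0
--     i = 0
--
--     while i < num - 1:
--         j = i
--         diff = sequence[j + 1] - sequence[j]
--         while j < num - 1 and sequence[j + 1] - sequence[j] == diff:
--             j += 1
--         count += 1
--         i = j
--     return count
-- ===== SOURCE B (Python) =====
-- def count(sequence):
--     if len(sequence) <= 2:
--         return 1
--     diffs = [b - a for a, b in zip(sequence, sequence[1:])]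
--     return 1 + sum(1 for x, y in zip(diffs, diffs[1:]) if x != y)
-- ===== Notes on version B (the rewrite author's own statement) =====
-- stated objective: simpler
-- what changed: Replaces A's nested while-loop segment extension over indices by building the adjacent-difference list once and counting transitions between unequal neighbouring differences in one flat comprehension pass.
import Mathlib
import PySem

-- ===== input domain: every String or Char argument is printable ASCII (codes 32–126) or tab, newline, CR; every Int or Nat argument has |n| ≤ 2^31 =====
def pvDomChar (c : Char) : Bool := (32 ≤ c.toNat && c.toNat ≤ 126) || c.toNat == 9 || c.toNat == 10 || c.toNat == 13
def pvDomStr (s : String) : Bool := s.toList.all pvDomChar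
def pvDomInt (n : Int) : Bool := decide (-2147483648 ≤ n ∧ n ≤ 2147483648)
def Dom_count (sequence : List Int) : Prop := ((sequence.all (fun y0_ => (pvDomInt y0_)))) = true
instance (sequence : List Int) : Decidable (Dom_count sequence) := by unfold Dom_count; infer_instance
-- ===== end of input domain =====

-- B replaces A's nested while-loop segment extension by a flat diff-list + count-of-transitions pass (objective: simpler).

-- ===== PORT A =====
-- Inner while loop: advance j while j < num-1 and sequence[j+1]-sequence[j] == diff.
-- Indices are always nonnegative and in range in A, so List.getD is exact here.
-- fuel only bounds the recursion depth (count passes enough for the loop to run to completion).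
def countInner (s : List Int) (num : Nat) (diff : Int) : Nat → Nat → Nat
  | 0, j => j
  | fuel+1, j =>
    if j < num - 1 ∧ s.getD (j+1) 0 - s.getD j 0 = diff then
      countInner s num diff fuel (j+1)
    else j

-- Outer while loop: i jumps to the end j of the current constant-difference run.
def countOuter (s : List Int) (num : Nat) : Nat → Nat → Int → Int
  | 0, _, acc => acc
  | fuel+1, i, acc =>
    if i < num - 1 then
      countOuter s num fuel (countInner s num (s.getD (i+1) 0 - s.getD i 0) num i) (acc + 1)
    else acc

def count (sequence : List Int) : Int :=
  let num := sequence.length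
  if num ≤ 2 then 1 else countOuter sequence num num 0 0

-- ===== PORT B =====
def count_alt (sequence : List Int) : Int :=
  if sequence.length ≤ 2 then 1
  else
    let diffs := (sequence.zip (sequence.drop 1)).map (fun p => p.2 - p.1)
    1 + (diffs.zip (diffs.drop 1)).foldl (fun acc p => if p.1 ≠ p.2 then acc + 1 else acc) 0

-- ===== PRECONDITION & SPEC =====
def Spec_count (sequence : List Int) (out : Int) : Prop := out = count_alt sequence
instance (sequence : List Int) (out : Int) : Decidable (Spec_count sequence out) := by unfold Spec_count; infer_instance

-- ===== CLAIM (what is proved, stated in full; the proofs are below) =====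
def Claim_equal_count : Prop := ∀ (sequence : List Int), Dom_count sequence → Spec_count sequence (count sequence)

-- ===== LEMMAS AND PROOFS =====

-- transition count with explicit previous element
def tr (x : Int) : List Int → Int
  | [] => 0
  | y :: l => (if x ≠ y then 1 else 0) + tr y l

-- list-level version of A's outer loop over the diff list
def runsGo (x : Int) (l : List Int) (acc : Int) : Int :=
  match h : l.dropWhile (· = x) with
  | [] => acc + 1
  | y :: r => runsGo y r (acc + 1)
termination_by l.length
decreasing_by
  have := List.length_dropWhile_le (p := (· = x)) (l := l)
  simp [h] at this; omega

theorem tr_dropWhile (x : Int) (l : List Int) : tr x l = tr x (l.dropWhile (· = x)) := by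
  induction l with
  | nil => rfl
  | cons y l ih =>
    by_cases hy : y = x
    · subst hy; simp [List.dropWhile, tr, ih]
    · simp [List.dropWhile, hy]

theorem runsGo_eq_tr (x : Int) (l : List Int) (acc : Int) :
    runsGo x l acc = acc + 1 + tr x l := by
  fun_induction runsGo with
  | case1 x l acc h => rw [tr_dropWhile, h]; simp [tr]
  | case2 x l acc y r h ih =>
    rw [ih, tr_dropWhile x l, h, tr]
    have : x ≠ y := by
      have := List.head_dropWhile_not (p := (· = x)) (l := l) (by simp [h])
      simp [h] at this; exact fun hc => this hc.symm
    simp only [ne_eq, this, not_false_iff, if_true]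
    ring

-- B's fold over zipped adjacent pairs computes tr
theorem fold_zip_tr (x : Int) (l : List Int) (acc : Int) :
    ((x :: l).zip l).foldl (fun acc p => if p.1 ≠ p.2 then acc + 1 else acc) acc
      = acc + tr x l := by
  induction l generalizing x acc with
  | nil => simp [tr]
  | cons y r ih =>
    simp only [List.zip_cons_cons, List.foldl_cons, tr, ih]
    by_cases h : x = y
    · simp [h]
    · simp [h]
      ring

-- the diff list
def dl (s : List Int) : List Int := (s.zip (s.drop 1)).map (fun p => p.2 - p.1)

theorem dl_length (s : List Int) : (dl s).length = s.length - 1 := by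
  simp [dl]

theorem dl_get (s : List Int) (k : Nat) (hk : k < s.length - 1) :
    (dl s)[k]'(by rw [dl_length]; omega)
      = s.getD (k+1) 0 - s.getD k 0 := by
  have h1 : k < s.length := by omega
  have h2 : k + 1 < s.length := by omega
  simp [dl, List.getD_eq_getElem?_getD, h1, h2]

theorem drop_len_takeWhile {α : Type} (p : α → Bool) (L : List α) :
    L.drop (L.takeWhile p).length = L.dropWhile p := by
  induction L with
  | nil => rfl
  | cons a L ih =>
    rw [List.takeWhile_cons, List.dropWhile_cons]
    by_cases h : p a = true
    · simp only [h, if_true]; simpa using ih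
    · simp [h]

-- A's inner loop computes j + length of the constant run in the diff list (given enough fuel)
theorem countInner_eq (s : List Int) (diff : Int) (fuel j : Nat)
    (hf : s.length - 1 - j ≤ fuel) :
    countInner s s.length diff fuel j
      = j + ((dl s).drop j |>.takeWhile (· = diff)).length := by
  induction fuel generalizing j with
  | zero =>
    have : (dl s).drop j = [] := by
      apply List.drop_eq_nil_of_le; rw [dl_length]; omega
    rw [this]; simp [countInner]
  | succ fuel ih =>
    rw [countInner]
    by_cases hc : j < s.length - 1 ∧ s.getD (j+1) 0 - s.getD j 0 = diff
    · obtain ⟨hj, hd⟩ := hc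
      have hdl : (dl s).drop j = (dl s)[j]'(by rw [dl_length]; omega) :: (dl s).drop (j+1) := by
        rw [List.drop_eq_getElem_cons (by rw [dl_length]; omega)]
      rw [if_pos ⟨hj, hd⟩, ih (j+1) (by omega), hdl, List.takeWhile_cons,
          if_pos (by simp only [decide_eq_true_eq, dl_get s j hj]; exact hd)]
      simp; omega
    · rw [if_neg hc]
      by_cases hj : j < s.length - 1
      · have hd : ¬ s.getD (j+1) 0 - s.getD j 0 = diff := fun h2 => hc ⟨hj, h2⟩
        have hdl : (dl s).drop j = (dl s)[j]'(by rw [dl_length]; omega) :: (dl s).drop (j+1) := by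
          rw [List.drop_eq_getElem_cons (by rw [dl_length]; omega)]
        rw [hdl, List.takeWhile_cons, if_neg (by simp [dl_get s j hj]; exact hd)]
        simp
      · have : (dl s).drop j = [] := by
          apply List.drop_eq_nil_of_le; rw [dl_length]; omega
        rw [this]; simp

-- once i has passed the last run, any fuel returns the accumulator
theorem countOuter_stop (s : List Int) (num fuel i : Nat) (acc : Int)
    (h : ¬ i < num - 1) : countOuter s num fuel i acc = acc := by
  cases fuel with
  | zero => rfl
  | succ fuel => rw [countOuter, if_neg h]

-- A's outer loop equals the list-level recursion on the diff-list suffix (given enough fuel)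
theorem countOuter_eq (s : List Int) (fuel i : Nat) (acc : Int)
    (hf : s.length - 1 - i ≤ fuel) (hi : i < s.length - 1) :
    countOuter s s.length fuel i acc
      = runsGo ((dl s)[i]'(by rw [dl_length]; omega)) ((dl s).drop (i+1)) acc := by
  induction fuel generalizing i acc with
  | zero => omega
  | succ fuel ih =>
    have hxmem : i < (dl s).length := by rw [dl_length]; omega
    set x := (dl s)[i]'hxmem with hx
    have hdiff : s.getD (i+1) 0 - s.getD i 0 = x := (dl_get s i hi).symm
    have hdl : (dl s).drop i = x :: (dl s).drop (i+1) := by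
      rw [List.drop_eq_getElem_cons hxmem]
    have hin : countInner s s.length x s.length i
        = i + 1 + ((dl s).drop (i+1) |>.takeWhile (· = x)).length := by
      rw [countInner_eq s x s.length i (by omega), hdl, List.takeWhile_cons, if_pos (by simp)]
      simp; omega
    have hdropj : (dl s).drop (countInner s s.length x s.length i)
        = ((dl s).drop (i+1)).dropWhile (· = x) := by
      rw [hin, ← List.drop_drop]
      exact drop_len_takeWhile (fun z => decide (z = x)) ((dl s).drop (i+1))
    rw [countOuter, if_pos hi, hdiff]
    rw [runsGo]
    split
    · next hcase =>
      have hjlen : (dl s).drop (countInner s s.length x s.length i) = [] := by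
        rw [hdropj, hcase]
      have hstop : ¬ countInner s s.length x s.length i < s.length - 1 := by
        intro hc
        have hne : (dl s).drop (countInner s s.length x s.length i) ≠ [] := by
          apply List.ne_nil_of_length_pos; rw [List.length_drop, dl_length]; omega
        exact hne hjlen
      exact countOuter_stop s s.length fuel _ (acc + 1) hstop
    · next y r hcase =>
      have hyr : (dl s).drop (countInner s s.length x s.length i) = y :: r := by
        rw [hdropj, hcase]
      have hjlt : countInner s s.length x s.length i < s.length - 1 := by
        have hne : (dl s).drop (countInner s s.length x s.length i) ≠ [] := by
          rw [hyr]; simp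
        have := List.length_pos_of_ne_nil hne
        rw [List.length_drop, dl_length] at this; omega
      have hjge : i + 1 ≤ countInner s s.length x s.length i := by rw [hin]; omega
      have hjmem : countInner s s.length x s.length i < (dl s).length := by
        rw [dl_length]; omega
      have hgetj : (dl s)[countInner s s.length x s.length i]'hjmem = y := by
        have h1 := List.drop_eq_getElem_cons (l := dl s) hjmem
        rw [hyr] at h1; exact (List.cons.injEq .. ▸ h1).1.symm
      have hdropj1 : (dl s).drop (countInner s s.length x s.length i + 1) = r := by
        rw [← List.drop_drop, hyr]; simp
      have ih' := ih _ (acc + 1) (by omega) hjlt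
      rw [ih', hgetj, hdropj1]

-- ===== VERDICT (by name: the statement is the Claim_ definition above) =====
theorem count_spec : Claim_equal_count := by
  intro s _
  unfold Spec_count count count_alt
  by_cases h2 : s.length ≤ 2
  · simp [h2]
  · simp only [h2, if_false]
    have hlen : 0 < s.length - 1 := by omega
    have hdl : dl s ≠ [] := by
      apply List.ne_nil_of_length_pos; rw [dl_length]; omega
    obtain ⟨x, l, hxl⟩ := List.exists_cons_of_ne_nil hdl
    have h0 : (dl s)[0]'(by rw [dl_length]; omega) = x := by simp [hxl]
    have hd1 : (dl s).drop 1 = l := by simp [hxl]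
    show countOuter s s.length s.length 0 0
      = 1 + ((dl s).zip ((dl s).drop 1)).foldl
          (fun acc p => if p.1 ≠ p.2 then acc + 1 else acc) 0
    rw [countOuter_eq s s.length 0 0 (by omega) hlen, h0, hd1, runsGo_eq_tr, hxl]
    rw [fold_zip_tr]
    ring
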